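-- pv_equiv track=rewrite | github.com/sergiobrboza/exercicios_python_br | exercicios_com_string/ex007.py | contar_espacos_e_vogais
-- ===== SOURCE A (Python) =====
-- def contar_espacos_e_vogais(frase):
--
--     espacos = 0
--     vogais = {'a': 0, 'e': 0, 'i': 0, 'o': 0, 'u': 0}
--
--     for letra in frase:
--
--         if letra == ' ':
--             espacos += 1
--
--         elif letra.lower() in vogais:
--             vogais[letra.lower()] += 1
--
--     return espacos, vogais
-- ===== SOURCE B (Python) =====
-- def contar_espacos_e_vogais(frase):
--     espacos = sum(1 for c in frase if c == ' ')
--     vogais = {v: sum(1 for c in frase if c.lower() == v) for v in 'aeiou'}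
--     return espacos, vogais
-- ===== Notes on version B (the rewrite author's own statement) =====
-- stated objective: alternative
-- what changed: Replaces A's single classifying loop with mutable state (a space counter and a dict updated in place) by independent per-quantity scans: a generator-sum for the spaces and a dict comprehension counting each vowel with its own scan.
import Mathlib
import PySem

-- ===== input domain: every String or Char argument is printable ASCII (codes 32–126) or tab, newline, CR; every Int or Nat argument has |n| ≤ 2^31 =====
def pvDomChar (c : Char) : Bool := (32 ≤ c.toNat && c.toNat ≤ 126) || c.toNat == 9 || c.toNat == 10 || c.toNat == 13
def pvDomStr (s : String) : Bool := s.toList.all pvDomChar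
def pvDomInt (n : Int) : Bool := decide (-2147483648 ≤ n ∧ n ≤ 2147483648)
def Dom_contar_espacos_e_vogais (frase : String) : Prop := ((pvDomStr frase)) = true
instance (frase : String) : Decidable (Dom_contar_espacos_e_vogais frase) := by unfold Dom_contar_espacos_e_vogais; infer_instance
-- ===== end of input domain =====

-- B replaces A's single classifying loop over mutable state (space counter + dict updated in
-- place) by one independent scan per quantity: a count for the spaces and one per-vowel count
-- building the dict; same asymptotic cost, no speed claim.

-- ===== PORT A =====
-- one fold over the characters carrying (espacos, vogais); 'vogais[k] += 1' is guarded by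
-- 'k in vogais', so Dict.modify with default 0 is exact there.
def contar_espacos_e_vogais (frase : String) : Int × (List (String × Int)) :=
  let init : PySem.Dict String Int :=
    PySem.Dict.ofList [("a", 0), ("e", 0), ("i", 0), ("o", 0), ("u", 0)]
  let r := frase.toList.foldl
    (fun (st : Int × PySem.Dict String Int) letra =>
      if letra == ' ' then (st.1 + 1, st.2)
      else if st.2.contains (PySem.Str.lower letra.toString) then
        (st.1, st.2.modify (PySem.Str.lower letra.toString) 0 (· + 1))
      else st)
    (0, init)
  (r.1, r.2.items)

-- ===== PORT B =====
def contar_espacos_e_vogais_alt (frase : String) : Int × (List (String × Int)) :=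
  let espacos : Int := frase.toList.countP (fun c => c == ' ')
  let vogais : List (String × Int) :=
    "aeiou".toList.map
      (fun v => (v.toString,
        (frase.toList.countP (fun c => PySem.Str.lower c.toString == v.toString) : Int)))
  (espacos, vogais)

-- ===== PRECONDITION & SPEC =====
def Spec_contar_espacos_e_vogais (frase : String) (out : Int × (List (String × Int))) : Prop := out = contar_espacos_e_vogais_alt frase
instance (frase : String) (out : Int × (List (String × Int))) : Decidable (Spec_contar_espacos_e_vogais frase out) := by unfold Spec_contar_espacos_e_vogais; infer_instance

-- ===== CLAIM (what is proved, stated in full; the proofs are below) =====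
def Claim_equal_contar_espacos_e_vogais : Prop := ∀ (frase : String), Dom_contar_espacos_e_vogais frase → Spec_contar_espacos_e_vogais frase (contar_espacos_e_vogais frase)

-- ===== LEMMAS AND PROOFS =====

-- B's per-vowel count, as a named abbreviation used by the loop invariant.
def pvCnt (v : String) (l : List Char) : Int :=
  l.countP (fun c => PySem.Str.lower c.toString == v)

theorem pvMod_a (na ne ni no nu : Int) :
    (PySem.Dict.mk [("a", na), ("e", ne), ("i", ni), ("o", no), ("u", nu)]).modify "a" 0 (· + 1) = PySem.Dict.mk [("a", na + 1), ("e", ne), ("i", ni), ("o", no), ("u", nu)] := by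
  apply PySem.Dict.ext
  simp [PySem.Dict.modify, PySem.Dict.insert, PySem.Dict.getD, PySem.Dict.get?, PySem.Dict.contains]

theorem pvCont_a (na ne ni no nu : Int) :
    (PySem.Dict.mk [("a", na), ("e", ne), ("i", ni), ("o", no), ("u", nu)]).contains "a" = true := by
  simp [PySem.Dict.contains]

theorem pvMod_e (na ne ni no nu : Int) :
    (PySem.Dict.mk [("a", na), ("e", ne), ("i", ni), ("o", no), ("u", nu)]).modify "e" 0 (· + 1) = PySem.Dict.mk [("a", na), ("e", ne + 1), ("i", ni), ("o", no), ("u", nu)] := by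
  apply PySem.Dict.ext
  simp [PySem.Dict.modify, PySem.Dict.insert, PySem.Dict.getD, PySem.Dict.get?, PySem.Dict.contains]

theorem pvCont_e (na ne ni no nu : Int) :
    (PySem.Dict.mk [("a", na), ("e", ne), ("i", ni), ("o", no), ("u", nu)]).contains "e" = true := by
  simp [PySem.Dict.contains]

theorem pvMod_i (na ne ni no nu : Int) :
    (PySem.Dict.mk [("a", na), ("e", ne), ("i", ni), ("o", no), ("u", nu)]).modify "i" 0 (· + 1) = PySem.Dict.mk [("a", na), ("e", ne), ("i", ni + 1), ("o", no), ("u", nu)] := by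
  apply PySem.Dict.ext
  simp [PySem.Dict.modify, PySem.Dict.insert, PySem.Dict.getD, PySem.Dict.get?, PySem.Dict.contains]

theorem pvCont_i (na ne ni no nu : Int) :
    (PySem.Dict.mk [("a", na), ("e", ne), ("i", ni), ("o", no), ("u", nu)]).contains "i" = true := by
  simp [PySem.Dict.contains]

theorem pvMod_o (na ne ni no nu : Int) :
    (PySem.Dict.mk [("a", na), ("e", ne), ("i", ni), ("o", no), ("u", nu)]).modify "o" 0 (· + 1) = PySem.Dict.mk [("a", na), ("e", ne), ("i", ni), ("o", no + 1), ("u", nu)] := by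
  apply PySem.Dict.ext
  simp [PySem.Dict.modify, PySem.Dict.insert, PySem.Dict.getD, PySem.Dict.get?, PySem.Dict.contains]

theorem pvCont_o (na ne ni no nu : Int) :
    (PySem.Dict.mk [("a", na), ("e", ne), ("i", ni), ("o", no), ("u", nu)]).contains "o" = true := by
  simp [PySem.Dict.contains]

theorem pvMod_u (na ne ni no nu : Int) :
    (PySem.Dict.mk [("a", na), ("e", ne), ("i", ni), ("o", no), ("u", nu)]).modify "u" 0 (· + 1) = PySem.Dict.mk [("a", na), ("e", ne), ("i", ni), ("o", no), ("u", nu + 1)] := by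
  apply PySem.Dict.ext
  simp [PySem.Dict.modify, PySem.Dict.insert, PySem.Dict.getD, PySem.Dict.get?, PySem.Dict.contains]

theorem pvCont_u (na ne ni no nu : Int) :
    (PySem.Dict.mk [("a", na), ("e", ne), ("i", ni), ("o", no), ("u", nu)]).contains "u" = true := by
  simp [PySem.Dict.contains]

-- loop invariant: A's fold from any state equals that state plus B's independent counts
theorem pvLoopA (l : List Char) (e na ne ni no nu : Int) :
    l.foldl
      (fun (st : Int × PySem.Dict String Int) letra =>
        if letra == ' ' then (st.1 + 1, st.2)
        else if st.2.contains (PySem.Str.lower letra.toString) then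
          (st.1, st.2.modify (PySem.Str.lower letra.toString) 0 (· + 1))
        else st)
      (e, PySem.Dict.mk [("a", na), ("e", ne), ("i", ni), ("o", no), ("u", nu)])
    = (e + l.countP (fun c => c == ' '),
       PySem.Dict.mk [("a", na + pvCnt "a" l), ("e", ne + pvCnt "e" l),
                      ("i", ni + pvCnt "i" l), ("o", no + pvCnt "o" l),
                      ("u", nu + pvCnt "u" l)]) := by
  induction l generalizing e na ne ni no nu with
  | nil => simp [pvCnt]
  | cons c l ih =>
    simp only [List.foldl_cons]
    by_cases hc : c = ' '
    · subst hc
      rw [if_pos (by decide : ((' ' == ' ') = true)), ih]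
      simp [pvCnt, List.countP_cons]
      omega
    · have hsp : (c == ' ') = false := by simp [hc]
      rw [if_neg (by simp [hc])]
      by_cases ha : PySem.Str.lower c.toString = "a"
      · have ha' : PySem.Str.lower (String.singleton c) = "a" := ha
        rw [ha, if_pos (pvCont_a ..), pvMod_a, ih]
        simp [pvCnt, hsp, ha']
        omega
      · by_cases he : PySem.Str.lower c.toString = "e"
        · have he' : PySem.Str.lower (String.singleton c) = "e" := he
          rw [he, if_pos (pvCont_e ..), pvMod_e, ih]
          simp [pvCnt, hsp, he']
          omega
        · by_cases hi : PySem.Str.lower c.toString = "i"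
          · have hi' : PySem.Str.lower (String.singleton c) = "i" := hi
            rw [hi, if_pos (pvCont_i ..), pvMod_i, ih]
            simp [pvCnt, hsp, hi']
            omega
          · by_cases ho : PySem.Str.lower c.toString = "o"
            · have ho' : PySem.Str.lower (String.singleton c) = "o" := ho
              rw [ho, if_pos (pvCont_o ..), pvMod_o, ih]
              simp [pvCnt, hsp, ho']
              omega
            · by_cases hu : PySem.Str.lower c.toString = "u"
              · have hu' : PySem.Str.lower (String.singleton c) = "u" := hu
                rw [hu, if_pos (pvCont_u ..), pvMod_u, ih]
                simp [pvCnt, hsp, hu']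
                omega
              · rw [if_neg (by
                  simp [PySem.Dict.contains]
                  exact ⟨fun h => ha h.symm, fun h => he h.symm, fun h => hi h.symm,
                    fun h => ho h.symm, fun h => hu h.symm⟩), ih]
                have Ha : (PySem.Str.lower (String.singleton c) == "a") = false := by
                  simpa using (ha : ¬PySem.Str.lower c.toString = "a")
                have He : (PySem.Str.lower (String.singleton c) == "e") = false := by
                  simpa using (he : ¬PySem.Str.lower c.toString = "e")
                have Hi : (PySem.Str.lower (String.singleton c) == "i") = false := by
                  simpa using (hi : ¬PySem.Str.lower c.toString = "i")
                have Ho : (PySem.Str.lower (String.singleton c) == "o") = false := by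
                  simpa using (ho : ¬PySem.Str.lower c.toString = "o")
                have Hu : (PySem.Str.lower (String.singleton c) == "u") = false := by
                  simpa using (hu : ¬PySem.Str.lower c.toString = "u")
                simp [pvCnt, hsp, Ha, He, Hi, Ho, Hu]

-- ===== VERDICT (by name: the statement is the Claim_ definition above) =====
theorem contar_espacos_e_vogais_spec : Claim_equal_contar_espacos_e_vogais := by
  intro frase _
  unfold Spec_contar_espacos_e_vogais contar_espacos_e_vogais contar_espacos_e_vogais_alt
  have hinit : PySem.Dict.ofList [("a", (0 : Int)), ("e", 0), ("i", 0), ("o", 0), ("u", 0)]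
      = PySem.Dict.mk [("a", 0), ("e", 0), ("i", 0), ("o", 0), ("u", 0)] := by decide
  have hv : "aeiou".toList = ['a', 'e', 'i', 'o', 'u'] := rfl
  simp only [hinit]
  rw [pvLoopA, hv]
  have ta : String.singleton 'a' = "a" := by decide
  have te : String.singleton 'e' = "e" := by decide
  have ti : String.singleton 'i' = "i" := by decide
  have to' : String.singleton 'o' = "o" := by decide
  have tu : String.singleton 'u' = "u" := by decide
  simp [pvCnt, Char.toString, ta, te, ti, to', tu]
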